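-- pv_equiv track=rewrite | github.com/sjlongland/aioax25 | aioax25/aprs/compression.py | decompress
-- ===== SOURCE A (Python) =====
-- BYTE_VALUE_OFFSET = 33
--
-- BYTE_VALUE_RADIX = 91
--
-- def decompress(value):
--     length = len(value)
--     return sum([
--             (
--                 (b - BYTE_VALUE_OFFSET)
--                 * (BYTE_VALUE_RADIX ** (length - i - 1))
--             )
--             for (i, b) in enumerate(bytes(value, "us-ascii"))
--     ])
-- ===== SOURCE B (Python) =====
-- def decompress(value):
--     result = 0
--     for b in bytes(value, "us-ascii"):
--         result = result * 91 + (b - 33)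
--     return result
-- ===== Notes on version B (the rewrite author's own statement) =====
-- stated objective: faster
-- what changed: Replaces the build-a-list-of-per-digit-powers-then-sum with a single Horner pass (result = result*91 + (b-33)), removing the per-digit exponentiation.
import Mathlib
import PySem

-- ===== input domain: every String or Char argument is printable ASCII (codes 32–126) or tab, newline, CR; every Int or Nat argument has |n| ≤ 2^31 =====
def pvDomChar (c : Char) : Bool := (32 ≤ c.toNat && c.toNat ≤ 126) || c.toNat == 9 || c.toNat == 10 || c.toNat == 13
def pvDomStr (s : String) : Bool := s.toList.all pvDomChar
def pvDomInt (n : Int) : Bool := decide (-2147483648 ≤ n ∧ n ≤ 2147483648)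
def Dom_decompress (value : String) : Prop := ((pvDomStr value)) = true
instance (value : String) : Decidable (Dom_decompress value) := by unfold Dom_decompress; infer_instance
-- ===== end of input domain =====

-- B replaces A's list of per-digit powers 91^(len-i-1) (summed afterwards) with a
-- single left-to-right Horner pass; objective: faster (O(n) instead of O(n^2) digit work).

-- ===== PORT A =====
-- sum([(b - 33) * 91 ** (length - i - 1) for (i, b) in enumerate(bytes(value, "us-ascii"))])
def decompress (value : String) : Int :=
  let length : Nat := value.toList.length
  ((PySem.List.enumerate value.toList 0).map
      (fun p => ((p.2.toNat : Int) - 33) * (91 : Int) ^ (((length : Int) - p.1 - 1).toNat))).sum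

-- ===== PORT B =====
def decompress_alt (value : String) : Int :=
  value.toList.foldl (fun result b => result * 91 + ((b.toNat : Int) - 33)) 0

-- ===== PRECONDITION & SPEC =====
def Spec_decompress (value : String) (out : Int) : Prop := out = decompress_alt value
instance (value : String) (out : Int) : Decidable (Spec_decompress value out) := by unfold Spec_decompress; infer_instance

-- ===== CLAIM (what is proved, stated in full; the proofs are below) =====
def Claim_equal_decompress : Prop := ∀ (value : String), Dom_decompress value → Spec_decompress value (decompress value)

-- ===== LEMMAS AND PROOFS =====

-- Reference value: digits of l in base 91, most significant first.
def pvRef (l : List Char) : Int :=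
  match l with
  | [] => 0
  | c :: t => ((c.toNat : Int) - 33) * (91 : Int) ^ t.length + pvRef t

theorem pvA_eq_ref (l : List Char) (s : Nat) :
    ((PySem.List.enumerate l (s : Int)).map
        (fun p => ((p.2.toNat : Int) - 33) * (91 : Int) ^ ((((s + l.length : Nat) : Int) - p.1 - 1).toNat))).sum
      = pvRef l := by
  induction l generalizing s with
  | nil => simp [PySem.List.enumerate_nil, pvRef]
  | cons c t ih =>
    rw [PySem.List.enumerate_cons]
    simp only [List.map_cons, List.sum_cons, pvRef]
    have h1 : (((s + (c :: t).length : Nat) : Int) - (s : Int) - 1).toNat = t.length := by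
      simp only [List.length_cons]; omega
    rw [h1]
    congr 1
    rw [← ih (s + 1)]
    apply congrArg List.sum
    apply List.map_congr_left
    intro p _
    have h2 : ((((s + (c :: t).length : Nat) : Int) - p.1 - 1).toNat)
        = ((((s + 1 + t.length : Nat) : Int) - p.1 - 1).toNat) := by
      simp only [List.length_cons]; omega
    rw [h2]

theorem pvB_eq_ref (l : List Char) (acc : Int) :
    l.foldl (fun result b => result * 91 + ((b.toNat : Int) - 33)) acc
      = acc * (91 : Int) ^ l.length + pvRef l := by
  induction l generalizing acc with
  | nil => simp [pvRef]
  | cons c t ih =>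
    simp only [List.foldl_cons, pvRef, List.length_cons]
    rw [ih]
    ring

-- ===== VERDICT (by name: the statement is the Claim_ definition above) =====
theorem decompress_spec : Claim_equal_decompress := by
  intro value _
  unfold Spec_decompress decompress decompress_alt
  have hA := pvA_eq_ref value.toList 0
  simp only [Nat.zero_add, Nat.cast_zero] at hA
  rw [hA, pvB_eq_ref]
  simp
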